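-- pv_equiv track=rewrite | github.com/tanaken-basis/OTG | otg_gradio.py | get_rank_vec
-- ===== SOURCE A (Python) =====
-- def get_rank_vec(v):
--     n = len(v)
--     rank = [0]*n
--     for i in range(n):
--         for j in range(i+1, n):
--             if v[i]>v[j]:
--                 rank[j] = rank[j] + 1
--             else:
--                 rank[i] = rank[i] + 1
--     return rank
-- ===== SOURCE B (Python) =====
-- def get_rank_vec(v):
--     # rank[k] = (number of elements strictly greater than v[k] anywhere)
--     #         + (number of elements equal to v[k] after position k)
--     return [sum(1 for y in v if y > x) + v[k+1:].count(x)
--             for k, x in enumerate(v)]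
-- ===== Notes on version B (the rewrite author's own statement) =====
-- stated objective: alternative
-- what changed: Replaces the nested all-pairs loop that mutates two rank cells per comparison by a per-element closed form: rank[k] is the count of strictly greater elements in the whole list plus the count of equal elements after position k, computed in a single comprehension with no mutation.
import Mathlib
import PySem

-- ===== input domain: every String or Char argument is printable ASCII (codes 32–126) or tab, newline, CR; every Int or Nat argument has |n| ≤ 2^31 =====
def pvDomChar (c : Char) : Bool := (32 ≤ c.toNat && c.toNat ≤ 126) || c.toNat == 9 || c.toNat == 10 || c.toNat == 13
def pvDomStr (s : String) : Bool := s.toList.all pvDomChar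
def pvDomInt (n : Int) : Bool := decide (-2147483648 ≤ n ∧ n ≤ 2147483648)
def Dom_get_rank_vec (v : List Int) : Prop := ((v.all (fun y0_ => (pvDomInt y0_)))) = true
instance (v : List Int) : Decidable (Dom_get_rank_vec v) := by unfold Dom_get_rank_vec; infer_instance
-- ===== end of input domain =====

-- B replaces A's mutating all-pairs double loop by a per-element closed form
-- (strictly-greater count overall + equal-count after the position); same cost class, no mutation.


-- ===== PORT A =====
-- helper: the inner loop 'for j in range(i+1, n): …'
def innerA (v : List Int) (i : Int) (r : List Int) : List Int :=
  (PySem.List.pyRange (i + 1) (v.length : Int) 1).foldl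
    (fun rank j =>
      if PySem.List.pyGetD v i 0 > PySem.List.pyGetD v j 0 then
        PySem.List.pySetD rank j (PySem.List.pyGetD rank j 0 + 1)
      else
        PySem.List.pySetD rank i (PySem.List.pyGetD rank i 0 + 1)) r

def get_rank_vec (v : List Int) : List Int :=
  (PySem.List.pyRange 0 (v.length : Int) 1).foldl
    (fun rank i => innerA v i rank)
    (List.replicate v.length (0 : Int))

-- ===== PORT B =====
def get_rank_vec_alt (v : List Int) : List Int :=
  (PySem.List.enumerate v 0).map (fun kx =>
    ((v.countP (fun y => decide (kx.2 < y)) : Nat) : Int)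
      + (((PySem.List.slice v (some (kx.1 + 1)) none).count kx.2 : Nat) : Int))

-- ===== PRECONDITION & SPEC =====
def Spec_get_rank_vec (v : List Int) (out : List Int) : Prop := out = get_rank_vec_alt v
instance (v : List Int) (out : List Int) : Decidable (Spec_get_rank_vec v out) := by unfold Spec_get_rank_vec; infer_instance

-- ===== CLAIM (what is proved, stated in full; the proofs are below) =====
def Claim_equal_get_rank_vec : Prop := ∀ (v : List Int), Dom_get_rank_vec v → Spec_get_rank_vec v (get_rank_vec v)

-- ===== LEMMAS AND PROOFS =====

-- the common elementwise value: strictly-greater count before k plus ≥ count after k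
def rankF (v : List Int) (k : Nat) : Int :=
  ((v.take k).countP (fun y => decide (v.getD k 0 < y)) : Nat)
    + ((v.drop (k + 1)).countP (fun y => decide (v.getD k 0 ≤ y)) : Nat)

-- Nat-land version of the inner-loop body
def stepN (v : List Int) (i : Nat) (r : List Int) (j : Nat) : List Int :=
  if v.getD i 0 > v.getD j 0 then r.set j (r.getD j 0 + 1) else r.set i (r.getD i 0 + 1)

theorem foldl_pyRange_natCast {α : Type} (f : α → Int → α) (a b : Nat) (init : α) :
    (PySem.List.pyRange (a : Int) (b : Int) 1).foldl f init
      = (List.range' a (b - a)).foldl (fun acc (t : Nat) => f acc (t : Int)) init := by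
  rw [PySem.List.pyRange_one]
  have h : (((b : Int)) - (a : Int)).toNat = b - a := by omega
  rw [h, List.range'_eq_map_range, List.foldl_map, List.foldl_map]
  apply List.foldl_ext
  intro acc k _
  push_cast
  rfl

theorem innerA_natCast (v : List Int) (i : Nat) (r : List Int) :
    innerA v (i : Int) r
      = (List.range' (i + 1) (v.length - (i + 1))).foldl (stepN v i) r := by
  unfold innerA
  have h : ((i : Int) + 1) = ((i + 1 : Nat) : Int) := by push_cast; ring
  rw [h, foldl_pyRange_natCast]
  apply List.foldl_ext
  intro acc j _
  simp [stepN]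

theorem length_stepN (v : List Int) (i : Nat) (r : List Int) (j : Nat) :
    (stepN v i r j).length = r.length := by
  unfold stepN; split <;> simp

theorem length_foldl_stepN (v : List Int) (i : Nat) (l : List Nat) (r : List Int) :
    (l.foldl (stepN v i) r).length = r.length := by
  induction l generalizing r with
  | nil => rfl
  | cons j t ih => rw [List.foldl_cons, ih, length_stepN]

theorem getD_set' (r : List Int) (n k : Nat) (x : Int) (hn : n < r.length) :
    (r.set n x).getD k 0 = if n = k then x else r.getD k 0 := by
  simp only [List.getD_eq_getElem?_getD, List.getElem?_set, hn, if_true]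
  split <;> simp

theorem innerN_getD (m : Nat) (v : List Int) (i : Nat) :
    ∀ (a : Nat) (r : List Int), i < a → r.length = v.length → m = v.length - a →
    ∀ (k : Nat), k < v.length →
    ((List.range' a m).foldl (stepN v i) r).getD k 0
      = r.getD k 0
        + (if k = i then (((v.drop a).countP (fun y => decide (v.getD i 0 ≤ y)) : Nat) : Int)
           else if a ≤ k ∧ v.getD k 0 < v.getD i 0 then 1 else 0) := by
  induction m with
  | zero =>
    intro a r hia hr hm k hk
    have ha : v.length ≤ a := by omega
    rw [List.drop_eq_nil_of_le ha]
    simp only [List.range'_zero, List.foldl_nil, List.countP_nil]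
    have h2 : ¬ (a ≤ k ∧ v.getD k 0 < v.getD i 0) := by
      rintro ⟨h, _⟩; omega
    split_ifs <;> simp
  | succ m ih =>
    intro a r hia hr hm k hk
    have ha : a < v.length := by omega
    rw [List.range'_succ, List.foldl_cons]
    rw [ih (a + 1) (stepN v i r a) (by omega) (by rw [length_stepN]; exact hr) (by omega) k hk]
    have hiv : i < r.length := by omega
    have hav : a < r.length := by omega
    have hdrop : v.drop a = v.getD a 0 :: v.drop (a + 1) := by
      rw [List.drop_eq_getElem_cons ha, List.getD_eq_getElem _ _ ha]
    rw [hdrop, List.countP_cons]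
    unfold stepN
    by_cases hc : v.getD i 0 > v.getD a 0
    · rw [if_pos hc, getD_set' r a k _ hav]
      have hle : ¬ (v.getD i 0 ≤ v.getD a 0) := by omega
      simp only [decide_eq_true_eq, hle, if_false]
      by_cases hki : k = i
      · subst hki
        have hka : ¬ (a = k) := by omega
        simp [hka]
      · by_cases hka : a = k
        · subst hka
          simp only [hki, if_false]
          have h1 : ¬ (a + 1 ≤ a) := by omega
          simp [h1]
          exact hc
        · simp only [hka, if_false, hki, if_false]
          split_ifs <;> omega
    · rw [if_neg hc, getD_set' r i k _ hiv]
      have hle : v.getD i 0 ≤ v.getD a 0 := by omega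
      simp only [decide_eq_true_eq, hle, if_true]
      by_cases hki : k = i
      · subst hki
        rw [if_pos (rfl : k = k), if_pos (rfl : k = k)]
        push_cast
        omega
      · have hik : ¬ (i = k) := fun h => hki h.symm
        simp only [hik, if_false, hki, if_false]
        by_cases hka : a = k
        · subst hka
          have h1 : ¬ (a + 1 ≤ a) := by omega
          have h2 : ¬ (a ≤ a ∧ v.getD a 0 < v.getD i 0) := by
            rintro ⟨_, h⟩; omega
          simp [h1]
          exact hle
        · split_ifs <;> omega

theorem outerN_getD (m : Nat) (v : List Int) :
    ∀ (a : Nat) (r : List Int), r.length = v.length → m = v.length - a →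
    ∀ (k : Nat), k < v.length →
    ((List.range' a m).foldl
        (fun r i => (List.range' (i + 1) (v.length - (i + 1))).foldl (stepN v i) r) r).getD k 0
      = r.getD k 0
        + (if a ≤ k then
            (((v.drop (k + 1)).countP (fun y => decide (v.getD k 0 ≤ y)) : Nat) : Int)
              + ((((v.drop a).take (k - a)).countP (fun y => decide (v.getD k 0 < y)) : Nat) : Int)
           else 0) := by
  induction m with
  | zero =>
    intro a r hr hm k hk
    have : ¬ (a ≤ k) := by omega
    simp [this]
  | succ m ih =>
    intro a r hr hm k hk
    have ha : a < v.length := by omega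
    rw [List.range'_succ, List.foldl_cons]
    set r' := (List.range' (a + 1) (v.length - (a + 1))).foldl (stepN v a) r with hr'
    have hr'len : r'.length = v.length := by rw [hr', length_foldl_stepN]; exact hr
    rw [ih (a + 1) r' hr'len (by omega) k hk]
    rw [hr', innerN_getD (v.length - (a + 1)) v a (a + 1) r (by omega) hr rfl k hk]
    have hdrop : v.drop a = v.getD a 0 :: v.drop (a + 1) := by
      rw [List.drop_eq_getElem_cons ha, List.getD_eq_getElem _ _ ha]
    by_cases hka : k = a
    · subst hka
      have h1 : ¬ (k + 1 ≤ k) := by omega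
      rw [if_pos (rfl : k = k), if_neg h1, if_pos (le_refl k), Nat.sub_self, List.take_zero,
        List.countP_nil]
      push_cast
      ring
    · by_cases hk2 : a ≤ k
      · have h1 : a + 1 ≤ k := by omega
        have h2 : ¬ (k = a) := hka
        rw [hdrop]
        have htake : (v.getD a 0 :: v.drop (a + 1)).take (k - a)
            = v.getD a 0 :: (v.drop (a + 1)).take (k - (a + 1)) := by
          have : k - a = (k - (a + 1)) + 1 := by omega
          rw [this, List.take_succ_cons]
        rw [htake, List.countP_cons]
        simp only [h2, if_false, if_pos h1, if_pos hk2, decide_eq_true_eq]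
        by_cases hc : v.getD k 0 < v.getD a 0
        · have hand : a + 1 ≤ k ∧ v.getD k 0 < v.getD a 0 := ⟨h1, hc⟩
          simp only [if_pos hc, if_pos hand]
          push_cast; ring
        · have : ¬ (a + 1 ≤ k ∧ v.getD k 0 < v.getD a 0) := by rintro ⟨_, h⟩; exact hc h
          simp only [if_neg hc, if_neg this, add_zero]
      · have h1 : ¬ (a + 1 ≤ k) := by omega
        have h2 : ¬ (a ≤ k) := hk2
        have h3 : ¬ (a + 1 ≤ k ∧ v.getD k 0 < v.getD a 0) := by rintro ⟨h, _⟩; omega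
        simp [hka, h1, h2]

theorem length_outer_foldl (v : List Int) (l : List Nat) (r : List Int) :
    (l.foldl (fun r i => (List.range' (i + 1) (v.length - (i + 1))).foldl (stepN v i) r) r).length
      = r.length := by
  induction l generalizing r with
  | nil => rfl
  | cons j t ih => rw [List.foldl_cons, ih, length_foldl_stepN]

theorem get_rank_vec_eq_map (v : List Int) :
    get_rank_vec v = (List.range v.length).map (rankF v) := by
  unfold get_rank_vec
  rw [show (0 : Int) = ((0 : Nat) : Int) by simp]
  rw [foldl_pyRange_natCast (fun rank i => innerA v i rank) 0 v.length]
  simp only [Nat.cast_zero]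
  rw [List.foldl_ext _
      (fun r i => (List.range' (i + 1) (v.length - (i + 1))).foldl (stepN v i) r)
      (List.replicate v.length (0 : Int))
      (fun acc i _ => innerA_natCast v i acc)]
  apply List.ext_getElem
  · rw [length_outer_foldl]
    simp
  · intro k hk1 hk2
    rw [length_outer_foldl, List.length_replicate] at hk1
    rw [← List.getD_eq_getElem
      ((List.range' 0 (v.length - 0)).foldl
        (fun r i => (List.range' (i + 1) (v.length - (i + 1))).foldl (stepN v i) r)
        (List.replicate v.length (0 : Int))) 0 (by rw [length_outer_foldl]; simpa using hk1)]
    have h := outerN_getD (v.length - 0) v 0 (List.replicate v.length (0 : Int))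
      (by simp) rfl k hk1
    rw [h, List.getD_replicate 0 hk1]
    simp only [Nat.zero_le, if_pos, List.drop_zero, Nat.sub_zero]
    rw [List.getElem_map, List.getElem_range]
    rw [rankF]
    ring

theorem enum_eq (v : List Int) (s : Nat) :
    PySem.List.enumerate v (s : Int) =
      (List.range v.length).map (fun k => (((s + k : Nat) : Int), v.getD k 0)) := by
  induction v generalizing s with
  | nil => simp [PySem.List.enumerate_nil]
  | cons x xs ih =>
    rw [PySem.List.enumerate_cons]
    have h1 : ((s : Int) + 1) = ((s + 1 : Nat) : Int) := by push_cast; ring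
    rw [h1, ih (s + 1)]
    simp [List.range_succ_eq_map, List.map_map, Function.comp]
    intro a _; ring
theorem countP_lt_add_count (d : List Int) (x : Int) :
    (d.countP (fun y => decide (x < y)) : Int) + (d.count x : Int)
      = (d.countP (fun y => decide (x ≤ y)) : Int) := by
  induction d with
  | nil => simp
  | cons y t ih =>
    simp only [List.countP_cons, List.count_cons]
    rcases lt_trichotomy x y with h | h | h
    · have h2 : x ≤ y := le_of_lt h
      have h3 : ¬ (y == x) := by simp; omega
      simp [h, h2, h3]; omega
    · subst h; simp; omega
    · have h2 : ¬ (x < y) := by omega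
      have h3 : ¬ (x ≤ y) := by omega
      have h4 : ¬ (y == x) := by simp; omega
      simp [h2, h3, h4]; omega
theorem pointwiseB (v : List Int) (k : Nat) (hk : k < v.length) :
    ((v.countP (fun y => decide (v.getD k 0 < y)) : Nat) : Int)
      + (((v.drop (k + 1)).count (v.getD k 0) : Nat) : Int) = rankF v k := by
  have hsplit : v = v.take k ++ v.getD k 0 :: v.drop (k + 1) := by
    rw [List.getD_eq_getElem _ _ hk]
    conv_lhs => rw [← List.take_append_drop k v]
    rw [List.drop_eq_getElem_cons hk]
  rw [rankF]
  generalize hx : v.getD k 0 = x at hsplit ⊢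
  have hcount : ∀ p : Int → Bool, v.countP p
      = (v.take k).countP p + (if p x then 1 else 0) + (v.drop (k + 1)).countP p := by
    intro p
    conv_lhs => rw [hsplit]
    simp [List.countP_append, List.countP_cons]
    omega
  rw [hcount]
  simp only [decide_eq_true_eq, lt_irrefl, if_false]
  have := countP_lt_add_count (v.drop (k + 1)) x
  push_cast
  omega
theorem get_rank_vec_alt_eq_map (v : List Int) :
    get_rank_vec_alt v = (List.range v.length).map (rankF v) := by
  unfold get_rank_vec_alt
  rw [show (0 : Int) = ((0 : Nat) : Int) by simp, enum_eq, List.map_map]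
  apply List.map_congr_left
  intro k hk
  rw [List.mem_range] at hk
  show ((v.countP _ : Nat) : Int) + _ = rankF v k
  have h1 : (((0 + k : Nat) : Int) + 1) = ((k + 1 : Nat) : Int) := by push_cast; ring
  simp only [h1, PySem.List.slice_from_natCast]
  exact pointwiseB v k hk

-- ===== VERDICT (by name: the statement is the Claim_ definition above) =====
theorem get_rank_vec_spec : Claim_equal_get_rank_vec := by
  intro v _
  unfold Spec_get_rank_vec
  rw [get_rank_vec_eq_map, get_rank_vec_alt_eq_map]
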